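-- pv_equiv track=rewrite | github.com/johnnyflame/advent-of-code-2021 | src/day7.py | find_min_global_cost
-- ===== SOURCE A (Python) =====
-- def find_min_global_cost(input_data, costs=None):
--     start, end = min(input_data), max(input_data) + 1
--
--     global_total_distance = float("inf")
--
--     for i in range(start, end):
--         curr_total_distance = 0
--         for pos in input_data:
--             curr_distace = abs(i - pos)
--             if costs:
--                 curr_total_distance += costs[curr_distace]
--             else:
--                 curr_total_distance += curr_distace
--         global_total_distance = min(global_total_distance, curr_total_distance)
--     return global_total_distance
-- ===== SOURCE B (Python) =====
-- def find_min_global_cost(input_data, costs=None):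
--     counts = {}
--     for pos in input_data:
--         counts[pos] = counts.get(pos, 0) + 1
--     best = None
--     for i in range(min(input_data), max(input_data) + 1):
--         total = 0
--         for pos, c in counts.items():
--             d = abs(i - pos)
--             total += c * (costs[d] if costs else d)
--         if best is None or total < best:
--             best = total
--     return best
-- ===== Notes on version B (the rewrite author's own statement) =====
-- stated objective: faster
-- what changed: B builds a frequency counter of positions once and, for each candidate alignment position, sums cost(distance) weighted by multiplicity over the distinct positions only, instead of A's inner scan over the whole list.
import Mathlib
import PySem

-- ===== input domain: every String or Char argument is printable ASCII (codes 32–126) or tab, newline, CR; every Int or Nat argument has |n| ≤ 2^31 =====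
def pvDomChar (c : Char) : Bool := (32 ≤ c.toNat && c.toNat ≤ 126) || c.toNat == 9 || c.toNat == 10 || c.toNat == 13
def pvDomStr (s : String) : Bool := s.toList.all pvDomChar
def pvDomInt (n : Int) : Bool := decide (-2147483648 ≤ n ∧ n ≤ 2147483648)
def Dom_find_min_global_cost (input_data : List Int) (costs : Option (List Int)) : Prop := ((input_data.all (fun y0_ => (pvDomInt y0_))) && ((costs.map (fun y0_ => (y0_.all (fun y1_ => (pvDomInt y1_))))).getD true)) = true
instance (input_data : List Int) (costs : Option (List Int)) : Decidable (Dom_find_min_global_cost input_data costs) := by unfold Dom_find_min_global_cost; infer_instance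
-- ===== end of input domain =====

-- B replaces A's inner scan over the whole crab list by a scan over a frequency
-- counter built once, weighting each distinct position by its multiplicity
-- (objective: faster on duplicate-heavy input; return value proved identical).


-- ===== PORT A =====
def find_min_global_cost (input_data : List Int) (costs : Option (List Int)) : Int :=
  match PySem.List.min? input_data (fun x => x), PySem.List.max? input_data (fun x => x) with
  | some start, some mx =>
    -- global_total_distance starts at float("inf"): modelled as Option Int (none = inf)
    let res := (PySem.List.pyRange start (mx + 1) 1).foldl
      (fun (g : Option Int) i =>
        let cur := input_data.foldl
          (fun t pos =>
            let d : Int := |i - pos|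
            if (match costs with | some cs => !cs.isEmpty | none => false) then
              t + (PySem.List.pyGet? (costs.getD []) d).getD 0   -- costs[d]; Pre_ keeps d in range
            else
              t + d) 0
        match g with
        | none => some cur
        | some g' => some (min g' cur)) none
    res.getD 0
  | _, _ => 0   -- min()/max() of empty list raise ValueError: excluded by Pre_

-- ===== PORT B =====
def find_min_global_cost_alt (input_data : List Int) (costs : Option (List Int)) : Int :=
  let counts := input_data.foldl
    (fun (d : PySem.Dict Int Int) pos => d.insert pos (d.getD pos 0 + 1)) PySem.Dict.empty
  match PySem.List.min? input_data (fun x => x) with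
  | none => 0
  | some lo =>
    match PySem.List.max? input_data (fun x => x) with
    | none => 0
    | some hi =>
      let best := (PySem.List.pyRange lo (hi + 1) 1).foldl
        (fun (b : Option Int) i =>
          let total := counts.items.foldl
            (fun t (pc : Int × Int) =>
              let d : Int := |i - pc.1|
              t + pc.2 * (if (match costs with | some cs => !cs.isEmpty | none => false) then
                            (PySem.List.pyGet? (costs.getD []) d).getD 0
                          else d)) 0
          -- 'if best is None or total < best'
          if b.isNone || decide (total < b.getD 0) then some total else b) none
      best.getD 0

-- ===== PRECONDITION & SPEC =====
-- Pre_ excludes exactly the inputs where Python A raises: the empty list (min/max raise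
-- ValueError) and a truthy costs list too short for the largest distance (IndexError).
def Pre_find_min_global_cost (input_data : List Int) (costs : Option (List Int)) : Prop :=
  input_data ≠ [] ∧
  ((costs.getD []).isEmpty = false →
    ∀ x ∈ input_data, ∀ y ∈ input_data, (x - y).natAbs < (costs.getD []).length)
instance (input_data : List Int) (costs : Option (List Int)) : Decidable (Pre_find_min_global_cost input_data costs) := by unfold Pre_find_min_global_cost; infer_instance

def pvWitness_find_min_global_cost : List Int × Option (List Int) := ([0, 2, 1, 2], some [0, 1, 3, 6])

def Spec_find_min_global_cost (input_data : List Int) (costs : Option (List Int)) (out : Int) : Prop := out = find_min_global_cost_alt input_data costs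
instance (input_data : List Int) (costs : Option (List Int)) (out : Int) : Decidable (Spec_find_min_global_cost input_data costs out) := by unfold Spec_find_min_global_cost; infer_instance

-- ===== CLAIM (what is proved, stated in full; the proofs are below) =====
def Claim_equal_find_min_global_cost : Prop := ∀ (input_data : List Int) (costs : Option (List Int)), Dom_find_min_global_cost input_data costs → Pre_find_min_global_cost input_data costs → Spec_find_min_global_cost input_data costs (find_min_global_cost input_data costs)

-- ===== LEMMAS AND PROOFS =====

-- summing the indicator at x (a member of the nodup list s) of g gives g x
theorem pv_sum_ite_single (s : List Int) (hs : s.Nodup) (x : Int) (hx : x ∈ s) (g : Int → Int) :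
    (s.map (fun k => if k = x then g k else 0)).sum = g x := by
  induction s with
  | nil => cases hx
  | cons a t ih =>
    obtain ⟨ha, ht⟩ := List.nodup_cons.mp hs
    simp only [List.map_cons, List.sum_cons]
    by_cases hax : a = x
    · subst hax
      have hz : (t.map (fun k => if k = a then g k else 0)).sum = 0 := by
        apply List.sum_eq_zero
        intro y hy
        obtain ⟨k, hk, rfl⟩ := List.mem_map.mp hy
        have hk' : k ≠ a := fun h => ha (h ▸ hk)
        simp [hk']
      simp [hz]
    · have hxt : x ∈ t := by
        rcases List.mem_cons.mp hx with h | h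
        · exact absurd h.symm hax
        · exact h
      rw [ih ht hxt]
      simp [hax]

-- weighted sum over a nodup support containing l's elements equals the plain sum
theorem pv_sum_over_support (l s : List Int) (hs : s.Nodup) (hsub : ∀ x ∈ l, x ∈ s) (g : Int → Int) :
    (s.map (fun k => (l.count k : Int) * g k)).sum = (l.map g).sum := by
  induction l with
  | nil => simp
  | cons x t ih =>
    have hx : x ∈ s := hsub x List.mem_cons_self
    have hsub' : ∀ y ∈ t, y ∈ s := fun y hy => hsub y (List.mem_cons_of_mem _ hy)
    have h1 : (s.map (fun k => ((x :: t).count k : Int) * g k)).sum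
        = (s.map (fun k => (t.count k : Int) * g k + (if k = x then g k else 0))).sum := by
      congr 1
      apply List.map_congr_left
      intro k _
      by_cases hk : k = x
      · subst hk
        simp [List.count_cons_self]
        ring
      · have hc : (x :: t).count k = t.count k := List.count_cons_of_ne (Ne.symm hk)
        simp [hc, hk]
    rw [h1, List.sum_map_add, ih hsub', pv_sum_ite_single s hs x hx g]
    simp [add_comm]

-- weighted sum over the distinct elements (with multiplicities) equals the plain sum
theorem pv_counter_sum (l : List Int) (g : Int → Int) :
    ((PySem.Set.ofList l).map (fun k => (l.count k : Int) * g k)).sum = (l.map g).sum :=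
  pv_sum_over_support l _ (PySem.Set.nodup_ofList _)
    (fun x hx => by rw [PySem.Set.mem_ofList]; exact hx) g

-- B's inner loop over the frequency counter computes A's inner loop over the list
theorem pv_totals (l : List Int) (w : Int → Int) :
    ((l.foldl (fun (d : PySem.Dict Int Int) pos => d.insert pos (d.getD pos 0 + 1))
        PySem.Dict.empty).items.foldl (fun t (pc : Int × Int) => t + pc.2 * w pc.1) 0)
      = l.foldl (fun t pos => t + w pos) 0 := by
  rw [PySem.Dict.foldl_insert_getD_add_one_eq_counter, PySem.Dict.items_counter, List.foldl_map,
      PySem.List.foldl_add (g := fun k => (l.count k : Int) * w k), PySem.List.foldl_add (g := w)]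
  rw [pv_counter_sum l w]

-- the two running-minimum loops agree when the per-candidate totals agree
theorem pv_outer (r : List Int) (f f' : Int → Int) (h : ∀ i, f i = f' i) (acc : Option Int) :
    r.foldl (fun (g : Option Int) i =>
        match g with
        | none => some (f i)
        | some g' => some (min g' (f i))) acc
      = r.foldl (fun (b : Option Int) i =>
        if b.isNone || decide (f' i < b.getD 0) then some (f' i) else b) acc := by
  have hf : f = f' := funext h
  subst hf
  induction r generalizing acc with
  | nil => rfl
  | cons a t ih =>
    simp only [List.foldl_cons]
    have hstep : (match acc with
        | none => some (f a)
        | some g' => some (min g' (f a)))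
      = (if acc.isNone || decide (f a < acc.getD 0) then some (f a) else acc) := by
      cases acc with
      | none => rfl
      | some g' =>
        rcases lt_or_ge (f a) g' with hlt | hge
        · simp [min_eq_right hlt.le, hlt]
        · simp [min_eq_left hge, not_lt.mpr hge]
    rw [hstep, ih]

-- ===== VERDICT (by name: the statement is the Claim_ definition above) =====
theorem find_min_global_cost_spec : Claim_equal_find_min_global_cost := by
  intro input_data costs _ _
  unfold Spec_find_min_global_cost find_min_global_cost find_min_global_cost_alt
  cases hmin : PySem.List.min? input_data (fun x => x) with
  | none => cases hmax : PySem.List.max? input_data (fun x => x) <;> rfl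
  | some lo =>
    cases hmax : PySem.List.max? input_data (fun x => x) with
    | none => rfl
    | some hi =>
      simp only []
      rcases costs with _ | cs
      · exact congrArg (fun o => Option.getD o 0)
          (pv_outer _ _ _ (fun i => (pv_totals input_data (fun pos => |i - pos|)).symm) none)
      · by_cases hcs : cs.isEmpty
        · simp only [hcs, Bool.not_true, Bool.false_eq_true, if_false, Option.getD_some]
          exact congrArg (fun o => Option.getD o 0)
            (pv_outer _ _ _ (fun i => (pv_totals input_data (fun pos => |i - pos|)).symm) none)
        · simp only [Bool.not_eq_true] at hcs
          simp only [hcs, Bool.not_false, if_true, Option.getD_some]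
          exact congrArg (fun o => Option.getD o 0)
            (pv_outer _ _ _ (fun i => (pv_totals input_data
              (fun pos => (PySem.List.pyGet? cs |i - pos|).getD 0)).symm) none)
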